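-- pv_equiv track=rewrite | github.com/Geni-zone/kg-qa | test.py | format_json_answer
-- ===== SOURCE A (Python) =====
-- def format_json_answer(s: str) -> str:
--     """
--     If a string contains "```json" and "```", remove them and return the stuff at the middle fo them,
--     else return the string itself
--
--     Parameters:
--     a (str): the input string containing a JSON of interest
--
--     Returns:
--     str: JSON as a string
--     """
--     start_tag = "```json"
--     end_tag = "```"
--
--     if start_tag in s and end_tag in s:
--         s = s[s.index(start_tag) + len(start_tag): s.rindex(end_tag)]
--
--     # remove all the line breaks
--     s = s.replace("\n", "")
--
--     new_s = ""
--     for i in range(0, len(s)):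
--         if s[i] == "\'":
--             is_quote_inside_value = True
--             j = i + 1
--             while j < len(s):
--                 if s[j] == " ":
--                     j += 1
--                 else:
--                     if s[j] == "\\" or s[j] == "," or s[j] == ":" or s[j] == "{" or s[j] == "}" or s[j] == "[" or s[j] == "]":
--                         is_quote_inside_value = False
--                     break
--             j = i - 1
--             if is_quote_inside_value:
--                 while j >= 0:
--
--                     if s[j] == " ":
--                         j -= 1
--                     else:
--                         if s[j] == "\\" or s[j] == "," or s[j] == ":" or s[j] == "{" or s[j] == "}" or s[j] == "[" or s[j] == "]":
--                             is_quote_inside_value = False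
--                         break
--             if is_quote_inside_value:
--                 new_s += "\\\'"
--             else:
--                 new_s += "\'"
--
--         elif s[i] == "\"":
--             is_quote_inside_value = True
--             j = i + 1
--             while j < len(s):
--                 if s[j] == " ":
--                     j += 1
--                 else:
--                     if s[j] == "," or s[j] == ":" or s[j] == "{" or s[j] == "}" or s[j] == "[" or s[j] == "]":
--                         is_quote_inside_value = False
--                     break
--             j = i - 1
--             if is_quote_inside_value:
--                 while j >= 0:
--                     if s[j] == " ":
--                         j -= 1
--                     else:
--                         if s[j] == "," or s[j] == ":" or s[j] == "{" or s[j] == "}" or s[j] == "[" or s[j] == "]":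
--                             is_quote_inside_value = False
--                         break
--             if is_quote_inside_value:
--                 new_s += "\\\""
--             else:
--                 new_s += "\""
--
--         else:
--             new_s += s[i]
--     return new_s
--
-- str = "{'description': 'Arthur Conan Doyle is the creator of Sherlock Holmes',\n 'source': 'Arthur Conan Doyle, a famous British author, known for Arthur Conan Doyle\\\'s detective novels featuring Sherlock Holmes, was born in Edinburgh but spent considerable time in London.'}"
-- ===== SOURCE B (Python) =====
-- def format_json_answer(s: str) -> str:
--     start_tag = "```json"
--     end_tag = "```"
--     if start_tag in s and end_tag in s:
--         s = s[s.index(start_tag) + len(start_tag): s.rindex(end_tag)]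
--     s = s.replace("\n", "")
--     # Precompute, right-to-left in one pass, the next non-space character after
--     # each position; track the previous non-space character while emitting.
--     nxt = []
--     cur = None
--     for c in reversed(s):
--         nxt.append(cur)
--         if c != " ":
--             cur = c
--     nxt.reverse()
--     specials = ",:{}[]"
--     out = []
--     prev = None
--     for c, nx in zip(s, nxt):
--         if c == "'":
--             boundary = (nx is not None and (nx == "\\" or nx in specials)) or \
--                        (prev is not None and (prev == "\\" or prev in specials))
--             out.append("'" if boundary else "\\'")
--         elif c == '"':
--             boundary = (nx is not None and nx in specials) or \
--                        (prev is not None and prev in specials)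
--             out.append('"' if boundary else '\\"')
--         else:
--             out.append(c)
--         if c != " ":
--             prev = c
--     return "".join(out)
-- ===== Notes on version B (the rewrite author's own statement) =====
-- stated objective: alternative
-- what changed: Replaces the per-quote inner while-loops that rescan neighbouring spaces with a single right-to-left pass precomputing each position's next non-space character plus a running previous-non-space accumulator, so each quote is classified without any inner scan.
import Mathlib
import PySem

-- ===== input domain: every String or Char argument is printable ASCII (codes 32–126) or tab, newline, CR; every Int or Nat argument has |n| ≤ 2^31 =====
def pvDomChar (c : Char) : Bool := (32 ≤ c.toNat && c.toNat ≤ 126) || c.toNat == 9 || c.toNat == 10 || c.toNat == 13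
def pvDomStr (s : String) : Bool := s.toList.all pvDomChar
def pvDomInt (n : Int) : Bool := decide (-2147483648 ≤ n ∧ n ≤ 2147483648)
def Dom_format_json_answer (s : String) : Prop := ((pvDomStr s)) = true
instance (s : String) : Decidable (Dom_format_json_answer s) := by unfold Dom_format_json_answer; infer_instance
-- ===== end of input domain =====

-- B replaces A's per-quote inner while-loops over neighbouring spaces by a precomputed
-- next-non-space array and a running previous-non-space accumulator (objective: alternative).
-- The fence-stripping / newline-removal prelude is IDENTICAL source code in both Pythons,
-- so both ports share the helper pvPrep.

def pvPrep (s : List Char) : List Char :=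
  let s :=
    if PySem.Chars.isIn "```json".toList s && PySem.Chars.isIn "```".toList s then
      PySem.Chars.slice s
        (some (PySem.Chars.find s "```json".toList + 7))
        (some (PySem.Chars.rfind s "```".toList))
    else s
  PySem.Chars.replace s "\n".toList []

-- ===== PORT A =====
-- the 'if s[j] == "\\" or s[j] == "," or …' test for single quotes
def pvSpecA1 (c : Char) : Bool :=
  c == '\\' || c == ',' || c == ':' || c == '{' || c == '}' || c == '[' || c == ']'
-- the same test for double quotes (no backslash case)
def pvSpecA2 (c : Char) : Bool :=
  c == ',' || c == ':' || c == '{' || c == '}' || c == '[' || c == ']'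

-- 'j = i + 1; while j < len(s): skip spaces, test first non-space, break'
def pvFwdA (cs : List Char) (p : Char → Bool) (j : Nat) : Bool :=
  if h : j < cs.length then
    if cs[j] == ' ' then pvFwdA cs p (j + 1)
    else !(p cs[j])
  else true
termination_by cs.length - j

-- 'j = i - 1; while j >= 0: skip spaces, test first non-space, break'; k = j + 1
def pvBwdA (cs : List Char) (p : Char → Bool) : Nat → Bool
  | 0 => true
  | k + 1 =>
    if h : k < cs.length then
      if cs[k] == ' ' then pvBwdA cs p k
      else !(p cs[k])
    else true

-- 'for i in range(0, len(s)): …' building new_s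
def pvLoopA (cs : List Char) (i : Nat) (acc : List Char) : List Char :=
  if h : i < cs.length then
    let c := cs[i]
    let piece :=
      if c == '\'' then
        let q := pvFwdA cs pvSpecA1 (i + 1)
        let q := if q then pvBwdA cs pvSpecA1 i else false
        if q then ['\\', '\''] else ['\'']
      else if c == '"' then
        let q := pvFwdA cs pvSpecA2 (i + 1)
        let q := if q then pvBwdA cs pvSpecA2 i else false
        if q then ['\\', '"'] else ['"']
      else [c]
    pvLoopA cs (i + 1) (acc ++ piece)
  else acc
termination_by cs.length - i

def format_json_answer (s : String) : String :=
  String.ofList (pvLoopA (pvPrep s.toList) 0 [])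

-- ===== PORT B =====
def pvSpecB : List Char := ",:{}[]".toList

-- the reversed pass building nxt (returns (cur, nxt) for the processed suffix)
def pvNxtB : List Char → Option Char × List (Option Char)
  | [] => (none, [])
  | c :: rest =>
    let (cur, tl) := pvNxtB rest
    (if c == ' ' then cur else some c, cur :: tl)

def pvEmitB (c : Char) (nx prev : Option Char) : List Char :=
  if c == '\'' then
    let boundary :=
      (match nx with | some a => a == '\\' || pvSpecB.contains a | none => false) ||
      (match prev with | some b => b == '\\' || pvSpecB.contains b | none => false)
    if boundary then ['\''] else ['\\', '\'']
  else if c == '"' then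
    let boundary :=
      (match nx with | some a => pvSpecB.contains a | none => false) ||
      (match prev with | some b => pvSpecB.contains b | none => false)
    if boundary then ['"'] else ['\\', '"']
  else [c]

-- 'for c, nx in zip(s, nxt): …' with the prev accumulator
def pvLoopB : List Char → List (Option Char) → Option Char → List Char
  | c :: cs, nx :: nxs, prev =>
    pvEmitB c nx prev ++ pvLoopB cs nxs (if c == ' ' then prev else some c)
  | _, _, _ => []

def format_json_answer_alt (s : String) : String :=
  let cs := pvPrep s.toList
  String.ofList (pvLoopB cs (pvNxtB cs).2 none)

-- ===== PRECONDITION & SPEC =====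
def Spec_format_json_answer (s : String) (out : String) : Prop := out = format_json_answer_alt s
instance (s : String) (out : String) : Decidable (Spec_format_json_answer s out) := by unfold Spec_format_json_answer; infer_instance

-- ===== CLAIM (what is proved, stated in full; the proofs are below) =====
def Claim_equal_format_json_answer : Prop := ∀ (s : String), Dom_format_json_answer s → Spec_format_json_answer s (format_json_answer s)

-- ===== LEMMAS AND PROOFS =====

-- first non-space character of a list
def pvFirstNS (l : List Char) : Option Char := l.find? (fun c => c != ' ')
-- last non-space character of a list
def pvLastNS (l : List Char) : Option Char := pvFirstNS l.reverse
-- 'scan verdict' for a neighbouring non-space character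
def pvCheck (p : Char → Bool) : Option Char → Bool
  | none => true
  | some c => !(p c)
-- pvNxts l lists, for each position, the first non-space strictly after it
def pvNxts : List Char → List (Option Char)
  | [] => []
  | _ :: rest => pvFirstNS rest :: pvNxts rest

theorem pvSpecB_A1 (a : Char) : (a == '\\' || pvSpecB.contains a) = pvSpecA1 a := by
  simp [pvSpecB, pvSpecA1, Bool.or_assoc, beq_eq_decide]

theorem pvSpecB_A2 (a : Char) : pvSpecB.contains a = pvSpecA2 a := by
  simp [pvSpecB, pvSpecA2, Bool.or_assoc, beq_eq_decide]

theorem pvFirstNS_cons (c : Char) (l : List Char) :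
    pvFirstNS (c :: l) = if c == ' ' then pvFirstNS l else some c := by
  by_cases hc : c == ' ' <;> simp [pvFirstNS, bne, hc]

theorem pvLastNS_concat (l : List Char) (c : Char) :
    pvLastNS (l ++ [c]) = if c == ' ' then pvLastNS l else some c := by
  simp [pvLastNS, List.reverse_append, pvFirstNS_cons]

theorem pvFwdA_eq (cs : List Char) (p : Char → Bool) (j : Nat) :
    pvFwdA cs p j = pvCheck p (pvFirstNS (cs.drop j)) := by
  rw [pvFwdA]
  by_cases h : j < cs.length
  · rw [dif_pos h, List.drop_eq_getElem_cons h, pvFirstNS_cons]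
    by_cases hc : cs[j] == ' '
    · simp only [hc, if_true]
      exact pvFwdA_eq cs p (j + 1)
    · simp [hc, pvCheck]
  · rw [dif_neg h, List.drop_eq_nil_of_le (by omega)]
    simp [pvFirstNS, pvCheck]
termination_by cs.length - j

theorem pvBwdA_eq (cs : List Char) (p : Char → Bool) (k : Nat) (hk : k ≤ cs.length) :
    pvBwdA cs p k = pvCheck p (pvLastNS (cs.take k)) := by
  induction k with
  | zero => simp [pvBwdA, pvLastNS, pvFirstNS, pvCheck]
  | succ k ih =>
    have h : k < cs.length := by omega
    have ht : cs.take (k + 1) = cs.take k ++ [cs[k]] := by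
      rw [List.take_add_one]; simp [List.getElem?_eq_getElem h]
    rw [ht, pvLastNS_concat]
    simp only [pvBwdA, dif_pos h]
    by_cases hc : cs[k] == ' '
    · simp only [hc, if_true]
      exact ih (by omega)
    · simp [hc, pvCheck]

theorem pvNxtB_eq (cs : List Char) :
    (pvNxtB cs).2 = pvNxts cs ∧ (pvNxtB cs).1 = pvFirstNS cs := by
  induction cs with
  | nil => simp [pvNxtB, pvNxts, pvFirstNS]
  | cons c rest ih =>
    obtain ⟨h2, h1⟩ := ih
    refine ⟨by simp [pvNxtB, pvNxts, h1, h2], ?_⟩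
    rw [pvFirstNS_cons]
    simp [pvNxtB, h1]

theorem pvEmitB_eq (c : Char) (nx prev : Option Char) :
    (if c == '\'' then
      (if (if pvCheck pvSpecA1 nx then pvCheck pvSpecA1 prev else false) then ['\\', '\''] else ['\''])
     else if c == '"' then
      (if (if pvCheck pvSpecA2 nx then pvCheck pvSpecA2 prev else false) then ['\\', '"'] else ['"'])
     else [c]) = pvEmitB c nx prev := by
  have key : ∀ (p : Char → Bool) (esc pl : List Char),
      (if (if pvCheck p nx then pvCheck p prev else false) then esc else pl) =
      (if ((match nx with | some a => p a | none => false) ||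
           (match prev with | some b => p b | none => false)) then pl else esc) := by
    intro p esc pl
    cases nx <;> cases prev
    case none.none => simp [pvCheck]
    case none.some b => cases hy : p b <;> simp [pvCheck, hy]
    case some.none a => cases hx : p a <;> simp [pvCheck, hx]
    case some.some a b => cases hx : p a <;> cases hy : p b <;> simp [pvCheck, hx, hy]
  unfold pvEmitB
  simp only [pvSpecB_A1]
  simp only [pvSpecB_A2]
  rw [key pvSpecA1, key pvSpecA2]

theorem pvLastNS_take_succ (cs : List Char) (i : Nat) (h : i < cs.length) :
    pvLastNS (cs.take (i + 1)) = if cs[i] == ' ' then pvLastNS (cs.take i) else some cs[i] := by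
  have ht : cs.take (i + 1) = cs.take i ++ [cs[i]] := by
    rw [List.take_add_one]; simp [List.getElem?_eq_getElem h]
  rw [ht, pvLastNS_concat]

theorem pvLoop_eq (cs : List Char) (i : Nat) (acc : List Char) (hi : i ≤ cs.length) :
    pvLoopA cs i acc =
      acc ++ pvLoopB (cs.drop i) (pvNxts (cs.drop i)) (pvLastNS (cs.take i)) := by
  rw [pvLoopA]
  by_cases h : i < cs.length
  · rw [dif_pos h]
    have hd : cs.drop i = cs[i] :: cs.drop (i + 1) := List.drop_eq_getElem_cons h
    rw [pvLoop_eq cs (i + 1) _ (by omega), hd]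
    rw [show pvNxts (cs[i] :: cs.drop (i + 1)) =
        pvFirstNS (cs.drop (i + 1)) :: pvNxts (cs.drop (i + 1)) from rfl]
    rw [pvLoopB]
    rw [← pvEmitB_eq cs[i] (pvFirstNS (cs.drop (i + 1))) (pvLastNS (cs.take i))]
    rw [pvFwdA_eq cs pvSpecA1 (i + 1), pvFwdA_eq cs pvSpecA2 (i + 1),
        pvBwdA_eq cs pvSpecA1 i (by omega), pvBwdA_eq cs pvSpecA2 i (by omega),
        pvLastNS_take_succ cs i h]
    by_cases hc : cs[i] == ' ' <;> simp [hc, List.append_assoc]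
  · rw [dif_neg h, List.drop_eq_nil_of_le (by omega)]
    simp [pvLoopB]
termination_by cs.length - i

-- ===== VERDICT (by name: the statement is the Claim_ definition above) =====
theorem format_json_answer_spec : Claim_equal_format_json_answer := by
  intro s _
  unfold Spec_format_json_answer format_json_answer format_json_answer_alt
  rw [pvLoop_eq (pvPrep s.toList) 0 [] (by omega)]
  simp [(pvNxtB_eq (pvPrep s.toList)).1, pvLastNS, pvFirstNS]
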